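-- pv_equiv track=rewrite | github.com/DailyForkCast/osint-foresight | eu_china_agreements/analyze_bri_and_failures.py | identify_failed_projects
-- ===== SOURCE A (Python) =====
-- def identify_failed_projects(agreements):
--     """Identify failed, cancelled, or problematic projects"""
--     failed_projects = {
--         'cancelled': [],
--         'suspended': [],
--         'controversial': [],
--         'renegotiated': [],
--         'under_review': []
--     }
--
--     for agreement in agreements:
--         url = agreement.get('source_url', '').lower()
--         domain = agreement.get('domain', '').lower()
--
--         # Check for failure indicators
--         if 'cancel' in url:
--             failed_projects['cancelled'].append(agreement)
--         elif 'suspend' in url or 'halt' in url: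
--             failed_projects['suspended'].append(agreement)
--         elif 'controvers' in url or 'protest' in url or 'opposition' in url:
--             failed_projects['controversial'].append(agreement)
--         elif 'renegotiat' in url:
--             failed_projects['renegotiated'].append(agreement)
--         elif 'review' in url or 'reassess' in url:
--             failed_projects['under_review'].append(agreement)
--
--     return failed_projects
-- ===== SOURCE B (Python) =====
-- RULES = [
--     ('cancelled', ['cancel']),
--     ('suspended', ['suspend', 'halt']),
--     ('controversial', ['controvers', 'protest', 'opposition']),
--     ('renegotiated', ['renegotiat']),
--     ('under_review', ['review', 'reassess']),
-- ]
--
--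
-- def _category_index(agreement):
--     """Index of the first rule whose keywords hit the url, else None."""
--     url = agreement.get('source_url', '').lower()
--     for i, (_cat, kws) in enumerate(RULES):
--         if any(kw in url for kw in kws):
--             return i
--     return None
--
--
-- def identify_failed_projects(agreements):
--     """Identify failed, cancelled, or problematic projects"""
--     tagged = [(_category_index(a), a) for a in agreements]
--     return {cat: [a for j, a in tagged if j == i]
--             for i, (cat, _kws) in enumerate(RULES)}
-- ===== Notes on version B (the rewrite author's own statement) =====
-- stated objective: alternative
-- what changed: Replaces the if/elif ladder appending into a mutable dict by a classify-then-group scheme: a rules table gives each agreement the index of its first matching category, and each bucket is then built by a comprehension over the tagged list.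
import Mathlib
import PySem

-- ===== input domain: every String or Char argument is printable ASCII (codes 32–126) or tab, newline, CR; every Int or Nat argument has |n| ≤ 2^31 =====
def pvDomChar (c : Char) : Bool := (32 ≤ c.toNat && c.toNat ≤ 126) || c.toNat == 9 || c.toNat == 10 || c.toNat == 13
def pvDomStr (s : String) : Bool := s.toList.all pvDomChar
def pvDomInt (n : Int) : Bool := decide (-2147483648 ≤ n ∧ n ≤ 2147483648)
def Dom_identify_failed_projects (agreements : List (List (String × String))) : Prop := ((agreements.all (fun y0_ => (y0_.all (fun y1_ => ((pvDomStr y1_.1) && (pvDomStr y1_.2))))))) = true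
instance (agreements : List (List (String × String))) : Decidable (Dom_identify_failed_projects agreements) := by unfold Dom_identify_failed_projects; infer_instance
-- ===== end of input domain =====

-- B replaces A's if/elif ladder appending into a mutable dict by classify-then-group:
-- a rules table tags each agreement with the index of its first matching category, and
-- each bucket is a comprehension over the tagged list (alternative decomposition, same cost).

-- ===== PORT A =====
def identify_failed_projects (agreements : List (List (String × String))) : List (String × List (List (String × String))) :=
  let init : PySem.Dict String (List (List (String × String))) :=
    PySem.Dict.mk [("cancelled", []), ("suspended", []), ("controversial", []), ("renegotiated", []), ("under_review", [])]
  (agreements.foldl (fun d agreement =>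
      let url := PySem.Str.lower ((PySem.Dict.mk agreement).getD "source_url" "")
      let _domain := PySem.Str.lower ((PySem.Dict.mk agreement).getD "domain" "")
      if PySem.Str.isIn "cancel" url then
        d.modify "cancelled" [] (· ++ [agreement])
      else if PySem.Str.isIn "suspend" url || PySem.Str.isIn "halt" url then
        d.modify "suspended" [] (· ++ [agreement])
      else if PySem.Str.isIn "controvers" url || PySem.Str.isIn "protest" url || PySem.Str.isIn "opposition" url then
        d.modify "controversial" [] (· ++ [agreement])
      else if PySem.Str.isIn "renegotiat" url then
        d.modify "renegotiated" [] (· ++ [agreement])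
      else if PySem.Str.isIn "review" url || PySem.Str.isIn "reassess" url then
        d.modify "under_review" [] (· ++ [agreement])
      else d) init).items

-- ===== PORT B =====
def pvRules : List (String × List String) :=
  [("cancelled", ["cancel"]),
   ("suspended", ["suspend", "halt"]),
   ("controversial", ["controvers", "protest", "opposition"]),
   ("renegotiated", ["renegotiat"]),
   ("under_review", ["review", "reassess"])]

-- the enumerate-loop of Source B's _category_index, carried index explicit
def pvCatIdx (rules : List (String × List String)) (i : Nat) (url : String) : Option Nat :=
  match rules with
  | [] => none
  | r :: rest => if r.2.any (fun kw => PySem.Str.isIn kw url) then some i else pvCatIdx rest (i + 1) url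

def pvCategoryIndex (agreement : List (String × String)) : Option Nat :=
  pvCatIdx pvRules 0 (PySem.Str.lower ((PySem.Dict.mk agreement).getD "source_url" ""))

def identify_failed_projects_alt (agreements : List (List (String × String))) : List (String × List (List (String × String))) :=
  let tagged := agreements.map (fun a => (pvCategoryIndex a, a))
  pvRules.zipIdx.map (fun p => (p.1.1, (tagged.filter (fun t => t.1 == some p.2)).map (·.2)))

-- ===== PRECONDITION & SPEC =====
def Spec_identify_failed_projects (agreements : List (List (String × String))) (out : List (String × List (List (String × String)))) : Prop := out = identify_failed_projects_alt agreements
instance (agreements : List (List (String × String))) (out : List (String × List (List (String × String)))) : Decidable (Spec_identify_failed_projects agreements out) := by unfold Spec_identify_failed_projects; infer_instance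

-- ===== CLAIM (what is proved, stated in full; the proofs are below) =====
def Claim_equal_identify_failed_projects : Prop := ∀ (agreements : List (List (String × String))), Dom_identify_failed_projects agreements → Spec_identify_failed_projects agreements (identify_failed_projects agreements)

-- ===== LEMMAS AND PROOFS =====

-- the bucket with index i, as B computes it
def pvBucket (i : Nat) (l : List (List (String × String))) : List (List (String × String)) :=
  ((l.map (fun a => (pvCategoryIndex a, a))).filter (fun t => t.1 == some i)).map (·.2)

lemma pvBucket_nil (i : Nat) : pvBucket i [] = [] := rfl

lemma pvBucket_cons (i : Nat) (a : List (String × String)) (l : List (List (String × String))) :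
    pvBucket i (a :: l) = if pvCategoryIndex a = some i then a :: pvBucket i l else pvBucket i l := by
  unfold pvBucket
  rw [List.map_cons, List.filter_cons]
  by_cases h : pvCategoryIndex a = some i
  · rw [if_pos h, if_pos (by simp [h])]
    simp
  · rw [if_neg h, if_neg (by simp [h])]

-- B's first-match rule scan, spelt out on the literal rules table
lemma pvCatIdx_rules (url : String) :
    pvCatIdx pvRules 0 url =
      if PySem.Str.isIn "cancel" url = true then some 0
      else if (PySem.Str.isIn "suspend" url || PySem.Str.isIn "halt" url) = true then some 1
      else if (PySem.Str.isIn "controvers" url || PySem.Str.isIn "protest" url || PySem.Str.isIn "opposition" url) = true then some 2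
      else if PySem.Str.isIn "renegotiat" url = true then some 3
      else if (PySem.Str.isIn "review" url || PySem.Str.isIn "reassess" url) = true then some 4
      else none := by
  simp only [pvCatIdx, pvRules, List.any_cons, List.any_nil, Bool.or_false]
  norm_num [or_assoc]

lemma pvFold_items (l : List (List (String × String)))
    (v0 v1 v2 v3 v4 : List (List (String × String))) :
    (l.foldl (fun d agreement =>
      let url := PySem.Str.lower ((PySem.Dict.mk agreement).getD "source_url" "")
      let _domain := PySem.Str.lower ((PySem.Dict.mk agreement).getD "domain" "")
      if PySem.Str.isIn "cancel" url then
        d.modify "cancelled" [] (· ++ [agreement])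
      else if PySem.Str.isIn "suspend" url || PySem.Str.isIn "halt" url then
        d.modify "suspended" [] (· ++ [agreement])
      else if PySem.Str.isIn "controvers" url || PySem.Str.isIn "protest" url || PySem.Str.isIn "opposition" url then
        d.modify "controversial" [] (· ++ [agreement])
      else if PySem.Str.isIn "renegotiat" url then
        d.modify "renegotiated" [] (· ++ [agreement])
      else if PySem.Str.isIn "review" url || PySem.Str.isIn "reassess" url then
        d.modify "under_review" [] (· ++ [agreement])
      else d)
      (PySem.Dict.mk [("cancelled", v0), ("suspended", v1), ("controversial", v2), ("renegotiated", v3), ("under_review", v4)])).items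
    = [("cancelled", v0 ++ pvBucket 0 l), ("suspended", v1 ++ pvBucket 1 l),
       ("controversial", v2 ++ pvBucket 2 l), ("renegotiated", v3 ++ pvBucket 3 l),
       ("under_review", v4 ++ pvBucket 4 l)] := by
  induction l generalizing v0 v1 v2 v3 v4 with
  | nil => simp [pvBucket_nil]
  | cons a l ih =>
    rw [List.foldl_cons]
    show (List.foldl _
      (if PySem.Str.isIn "cancel" (PySem.Str.lower ((PySem.Dict.mk a).getD "source_url" "")) then
        (PySem.Dict.mk [("cancelled", v0), ("suspended", v1), ("controversial", v2), ("renegotiated", v3), ("under_review", v4)]).modify "cancelled" [] (· ++ [a])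
      else if PySem.Str.isIn "suspend" (PySem.Str.lower ((PySem.Dict.mk a).getD "source_url" "")) || PySem.Str.isIn "halt" (PySem.Str.lower ((PySem.Dict.mk a).getD "source_url" "")) then
        (PySem.Dict.mk [("cancelled", v0), ("suspended", v1), ("controversial", v2), ("renegotiated", v3), ("under_review", v4)]).modify "suspended" [] (· ++ [a])
      else if PySem.Str.isIn "controvers" (PySem.Str.lower ((PySem.Dict.mk a).getD "source_url" "")) || PySem.Str.isIn "protest" (PySem.Str.lower ((PySem.Dict.mk a).getD "source_url" "")) || PySem.Str.isIn "opposition" (PySem.Str.lower ((PySem.Dict.mk a).getD "source_url" "")) then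
        (PySem.Dict.mk [("cancelled", v0), ("suspended", v1), ("controversial", v2), ("renegotiated", v3), ("under_review", v4)]).modify "controversial" [] (· ++ [a])
      else if PySem.Str.isIn "renegotiat" (PySem.Str.lower ((PySem.Dict.mk a).getD "source_url" "")) then
        (PySem.Dict.mk [("cancelled", v0), ("suspended", v1), ("controversial", v2), ("renegotiated", v3), ("under_review", v4)]).modify "renegotiated" [] (· ++ [a])
      else if PySem.Str.isIn "review" (PySem.Str.lower ((PySem.Dict.mk a).getD "source_url" "")) || PySem.Str.isIn "reassess" (PySem.Str.lower ((PySem.Dict.mk a).getD "source_url" "")) then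
        (PySem.Dict.mk [("cancelled", v0), ("suspended", v1), ("controversial", v2), ("renegotiated", v3), ("under_review", v4)]).modify "under_review" [] (· ++ [a])
      else (PySem.Dict.mk [("cancelled", v0), ("suspended", v1), ("controversial", v2), ("renegotiated", v3), ("under_review", v4)])) l).items = _
    have hmk : pvCategoryIndex a = pvCatIdx pvRules 0 (PySem.Str.lower ((PySem.Dict.mk a).getD "source_url" "")) := rfl
    by_cases h0 : PySem.Str.isIn "cancel" (PySem.Str.lower ((PySem.Dict.mk a).getD "source_url" "")) = true
    · have hc : pvCategoryIndex a = some 0 := by rw [hmk, pvCatIdx_rules, if_pos h0]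
      rw [if_pos h0]
      rw [show ((PySem.Dict.mk [("cancelled", v0), ("suspended", v1), ("controversial", v2), ("renegotiated", v3), ("under_review", v4)]).modify "cancelled" [] (· ++ [a]))
           = PySem.Dict.mk [("cancelled", v0 ++ [a]), ("suspended", v1), ("controversial", v2), ("renegotiated", v3), ("under_review", v4)] from by
        simp [PySem.Dict.modify, PySem.Dict.insert, PySem.Dict.getD, PySem.Dict.get?, PySem.Dict.contains]]
      rw [ih]
      simp [pvBucket_cons, hc]
    · by_cases h1 : (PySem.Str.isIn "suspend" (PySem.Str.lower ((PySem.Dict.mk a).getD "source_url" "")) || PySem.Str.isIn "halt" (PySem.Str.lower ((PySem.Dict.mk a).getD "source_url" ""))) = true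
      · have hc : pvCategoryIndex a = some 1 := by rw [hmk, pvCatIdx_rules, if_neg h0, if_pos h1]
        rw [if_neg h0, if_pos h1]
        rw [show ((PySem.Dict.mk [("cancelled", v0), ("suspended", v1), ("controversial", v2), ("renegotiated", v3), ("under_review", v4)]).modify "suspended" [] (· ++ [a]))
             = PySem.Dict.mk [("cancelled", v0), ("suspended", v1 ++ [a]), ("controversial", v2), ("renegotiated", v3), ("under_review", v4)] from by
          simp [PySem.Dict.modify, PySem.Dict.insert, PySem.Dict.getD, PySem.Dict.get?, PySem.Dict.contains]]
        rw [ih]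
        simp [pvBucket_cons, hc]
      · by_cases h2 : (PySem.Str.isIn "controvers" (PySem.Str.lower ((PySem.Dict.mk a).getD "source_url" "")) || PySem.Str.isIn "protest" (PySem.Str.lower ((PySem.Dict.mk a).getD "source_url" "")) || PySem.Str.isIn "opposition" (PySem.Str.lower ((PySem.Dict.mk a).getD "source_url" ""))) = true
        · have hc : pvCategoryIndex a = some 2 := by rw [hmk, pvCatIdx_rules, if_neg h0, if_neg h1, if_pos h2]
          rw [if_neg h0, if_neg h1, if_pos h2]
          rw [show ((PySem.Dict.mk [("cancelled", v0), ("suspended", v1), ("controversial", v2), ("renegotiated", v3), ("under_review", v4)]).modify "controversial" [] (· ++ [a]))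
               = PySem.Dict.mk [("cancelled", v0), ("suspended", v1), ("controversial", v2 ++ [a]), ("renegotiated", v3), ("under_review", v4)] from by
            simp [PySem.Dict.modify, PySem.Dict.insert, PySem.Dict.getD, PySem.Dict.get?, PySem.Dict.contains]]
          rw [ih]
          simp [pvBucket_cons, hc]
        · by_cases h3 : PySem.Str.isIn "renegotiat" (PySem.Str.lower ((PySem.Dict.mk a).getD "source_url" "")) = true
          · have hc : pvCategoryIndex a = some 3 := by rw [hmk, pvCatIdx_rules, if_neg h0, if_neg h1, if_neg h2, if_pos h3]
            rw [if_neg h0, if_neg h1, if_neg h2, if_pos h3]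
            rw [show ((PySem.Dict.mk [("cancelled", v0), ("suspended", v1), ("controversial", v2), ("renegotiated", v3), ("under_review", v4)]).modify "renegotiated" [] (· ++ [a]))
                 = PySem.Dict.mk [("cancelled", v0), ("suspended", v1), ("controversial", v2), ("renegotiated", v3 ++ [a]), ("under_review", v4)] from by
              simp [PySem.Dict.modify, PySem.Dict.insert, PySem.Dict.getD, PySem.Dict.get?, PySem.Dict.contains]]
            rw [ih]
            simp [pvBucket_cons, hc]
          · by_cases h4 : (PySem.Str.isIn "review" (PySem.Str.lower ((PySem.Dict.mk a).getD "source_url" "")) || PySem.Str.isIn "reassess" (PySem.Str.lower ((PySem.Dict.mk a).getD "source_url" ""))) = true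
            · have hc : pvCategoryIndex a = some 4 := by rw [hmk, pvCatIdx_rules, if_neg h0, if_neg h1, if_neg h2, if_neg h3, if_pos h4]
              rw [if_neg h0, if_neg h1, if_neg h2, if_neg h3, if_pos h4]
              rw [show ((PySem.Dict.mk [("cancelled", v0), ("suspended", v1), ("controversial", v2), ("renegotiated", v3), ("under_review", v4)]).modify "under_review" [] (· ++ [a]))
                   = PySem.Dict.mk [("cancelled", v0), ("suspended", v1), ("controversial", v2), ("renegotiated", v3), ("under_review", v4 ++ [a])] from by
                simp [PySem.Dict.modify, PySem.Dict.insert, PySem.Dict.getD, PySem.Dict.get?, PySem.Dict.contains]]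
              rw [ih]
              simp [pvBucket_cons, hc]
            · have hc : pvCategoryIndex a = none := by rw [hmk, pvCatIdx_rules, if_neg h0, if_neg h1, if_neg h2, if_neg h3, if_neg h4]
              rw [if_neg h0, if_neg h1, if_neg h2, if_neg h3, if_neg h4]
              rw [ih]
              simp [pvBucket_cons, hc]

lemma pvAlt_eq (agreements : List (List (String × String))) :
    identify_failed_projects_alt agreements
      = [("cancelled", pvBucket 0 agreements), ("suspended", pvBucket 1 agreements),
         ("controversial", pvBucket 2 agreements), ("renegotiated", pvBucket 3 agreements),
         ("under_review", pvBucket 4 agreements)] := by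
  simp [identify_failed_projects_alt, pvRules, List.zipIdx, pvBucket]

-- ===== VERDICT (by name: the statement is the Claim_ definition above) =====
theorem identify_failed_projects_spec : Claim_equal_identify_failed_projects := by
  intro agreements _
  show identify_failed_projects agreements = identify_failed_projects_alt agreements
  rw [identify_failed_projects, pvAlt_eq]
  rw [pvFold_items]
  simp
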